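-- pv_equiv track=rewrite | github.com/aphoticshaman/HungryOrca | gatorca_phase5_dna_library.py | outer_ring
-- ===== SOURCE A (Python) =====
-- from typing import List, Dict, Any, Tuple, Set
--
-- Grid = List[List[int]]
--
-- def outer_ring(g: Grid) -> Grid:
--     """Extract outer ring only"""
--     if not g or not g[0]:
--         return g
--
--     h, w = len(g), len(g[0])
--     result = [[0]*w for _ in range(h)]
--
--     # Top and bottom rows
--     for x in range(w):
--         result[0][x] = g[0][x]
--         result[h-1][x] = g[h-1][x]
--
--     # Left and right columns
--     for y in range(h):
--         result[y][0] = g[y][0]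
--         result[y][w-1] = g[y][w-1]
--
--     return result
-- ===== SOURCE B (Python) =====
-- from typing import List
--
-- Grid = List[List[int]]
--
-- def outer_ring(g: Grid) -> Grid:
--     """Extract outer ring only"""
--     if not g or not g[0]:
--         return g
--     h, w = len(g), len(g[0])
--     last = h - 1
--     out = []
--     for y, row in enumerate(g):
--         if y == 0 or y == last:
--             out.append(row[:w])
--         elif w == 1:
--             out.append([row[0]])
--         else:
--             out.append([row[0]] + [0] * (w - 2) + [row[w - 1]])
--     return out
-- ===== Notes on version B (the rewrite author's own statement) =====
-- stated objective: simpler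
-- what changed: B builds each output row directly in one pass over the rows (full truncated copy for border rows, [left]+zeros+[right] for interior rows) instead of allocating a zero grid and mutating it with two separate index loops over columns and rows.
import Mathlib
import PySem

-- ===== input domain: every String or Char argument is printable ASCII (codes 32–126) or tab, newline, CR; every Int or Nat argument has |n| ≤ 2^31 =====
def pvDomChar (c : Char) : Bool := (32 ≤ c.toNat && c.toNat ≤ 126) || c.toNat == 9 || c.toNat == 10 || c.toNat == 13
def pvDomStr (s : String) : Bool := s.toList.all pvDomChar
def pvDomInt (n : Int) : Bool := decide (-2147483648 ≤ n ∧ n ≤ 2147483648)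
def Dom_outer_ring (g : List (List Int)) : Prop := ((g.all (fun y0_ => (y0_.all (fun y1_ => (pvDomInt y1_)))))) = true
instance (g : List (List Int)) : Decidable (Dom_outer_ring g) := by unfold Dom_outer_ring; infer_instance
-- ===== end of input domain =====

-- B builds each output row directly in one pass over the rows instead of mutating a
-- pre-allocated zero grid with two separate index loops; same cost, simpler decomposition.


-- ===== PORT A =====
-- Literal port of A: zero grid of h rows × w columns, then the x-loop writes rows 0
-- and h-1, then the y-loop writes columns 0 and w-1 (list mutation = List.set;
-- indexing = getD, in range on every input admitted by Pre_outer_ring).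
def outer_ring (g : List (List Int)) : List (List Int) :=
  if g = [] ∨ g.headD [] = [] then g
  else
    let h := g.length
    let w := (g.headD []).length
    let result : List (List Int) := (List.range h).map (fun _ => List.replicate w (0 : Int))
    let result := (List.range w).foldl (fun res x =>
      let res := res.set 0 ((res.getD 0 []).set x ((g.getD 0 []).getD x 0))
      res.set (h - 1) ((res.getD (h - 1) []).set x ((g.getD (h - 1) []).getD x 0))) result
    let result := (List.range h).foldl (fun res y =>
      let res := res.set y ((res.getD y []).set 0 ((g.getD y []).getD 0 0))
      res.set y ((res.getD y []).set (w - 1) ((g.getD y []).getD (w - 1) 0))) result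
    result

-- ===== PORT B =====
-- Literal port of B: one pass over enumerate(g) building each output row directly.
def outer_ring_alt (g : List (List Int)) : List (List Int) :=
  if g = [] ∨ g.headD [] = [] then g
  else
    let h := g.length
    let w := (g.headD []).length
    let last := h - 1
    g.zipIdx.map (fun p =>
      let row := p.1
      let y := p.2
      if y = 0 ∨ y = last then row.take w
      else if w = 1 then [row.getD 0 0]
      else row.getD 0 0 :: (List.replicate (w - 2) (0 : Int) ++ [row.getD (w - 1) 0]))

-- ===== PRECONDITION & SPEC =====
-- Pre_ excludes exactly the ragged grids on which A raises IndexError: a row shorter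
-- than the first row (g[y][w-1] / g[h-1][x] out of range).
def Pre_outer_ring (g : List (List Int)) : Prop :=
  ∀ r ∈ g, (g.headD []).length ≤ r.length
instance (g : List (List Int)) : Decidable (Pre_outer_ring g) := by unfold Pre_outer_ring; infer_instance
def pvWitness_outer_ring : List (List Int) := [[1, 2, 3], [4, 5, 6], [7, 8, 9]]
def Spec_outer_ring (g : List (List Int)) (out : List (List Int)) : Prop := out = outer_ring_alt g
instance (g : List (List Int)) (out : List (List Int)) : Decidable (Spec_outer_ring g out) := by unfold Spec_outer_ring; infer_instance

-- ===== CLAIM (what is proved, stated in full; the proofs are below) =====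
def Claim_equal_outer_ring : Prop := ∀ (g : List (List Int)), Dom_outer_ring g → Pre_outer_ring g → Spec_outer_ring g (outer_ring g)

-- ===== LEMMAS AND PROOFS =====

-- generic: getD through set (used throughout both loop characterisations)
theorem pv_getD_set {α : Type} (l : List α) (i j : Nat) (a d : α) :
    (l.set i a).getD j d = if j = i ∧ i < l.length then a else l.getD j d := by
  simp [List.getD_eq_getElem?_getD, List.getElem?_set]
  split_ifs <;> simp_all

-- A's first loop (top/bottom rows), parametrised by the number of iterations k
def A_loop1 (g : List (List Int)) (k : Nat) (res : List (List Int)) : List (List Int) :=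
  (List.range k).foldl (fun res x =>
    let res := res.set 0 ((res.getD 0 []).set x ((g.getD 0 []).getD x 0))
    res.set (g.length - 1) ((res.getD (g.length - 1) []).set x ((g.getD (g.length - 1) []).getD x 0))) res

-- A's second loop (left/right columns)
def A_loop2 (g : List (List Int)) (k : Nat) (res : List (List Int)) : List (List Int) :=
  (List.range k).foldl (fun res y =>
    let res := res.set y ((res.getD y []).set 0 ((g.getD y []).getD 0 0))
    res.set y ((res.getD y []).set ((g.headD []).length - 1) ((g.getD y []).getD ((g.headD []).length - 1) 0))) res

theorem A_loop1_succ (g : List (List Int)) (k : Nat) (res : List (List Int)) :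
    A_loop1 g (k+1) res =
      (let R := A_loop1 g k res
       let R1 := R.set 0 ((R.getD 0 []).set k ((g.getD 0 []).getD k 0))
       R1.set (g.length - 1) ((R1.getD (g.length - 1) []).set k ((g.getD (g.length - 1) []).getD k 0))) := by
  simp [A_loop1, List.range_succ, List.foldl_append]

theorem A_loop2_succ (g : List (List Int)) (k : Nat) (res : List (List Int)) :
    A_loop2 g (k+1) res =
      (let R := A_loop2 g k res
       let R1 := R.set k ((R.getD k []).set 0 ((g.getD k []).getD 0 0))
       R1.set k ((R1.getD k []).set ((g.headD []).length - 1) ((g.getD k []).getD ((g.headD []).length - 1) 0))) := by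
  simp [A_loop2, List.range_succ, List.foldl_append]

theorem A_loop1_length (g : List (List Int)) (k : Nat) (res : List (List Int)) :
    (A_loop1 g k res).length = res.length := by
  induction k with
  | zero => rfl
  | succ k ih => rw [A_loop1_succ]; simp [ih]

theorem A_loop2_length (g : List (List Int)) (k : Nat) (res : List (List Int)) :
    (A_loop2 g k res).length = res.length := by
  induction k with
  | zero => rfl
  | succ k ih => rw [A_loop2_succ]; simp [ih]

theorem A_loop1_row_length (g : List (List Int)) (k : Nat) (res : List (List Int)) (i : Nat) :
    ((A_loop1 g k res).getD i []).length = ((res.getD i []).length) := by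
  induction k generalizing i with
  | zero => rfl
  | succ k ih =>
    rw [A_loop1_succ]
    simp only [pv_getD_set, List.length_set]
    split_ifs with h1 h2 h3
    · obtain ⟨rfl, -⟩ := h1; rw [h2.1]; simpa [List.getD_eq_getElem?_getD] using ih 0
    · obtain ⟨rfl, -⟩ := h1; simpa [List.getD_eq_getElem?_getD] using ih (g.length - 1)
    · obtain ⟨rfl, -⟩ := h3; simpa [List.getD_eq_getElem?_getD] using ih 0
    · simpa [List.getD_eq_getElem?_getD] using ih i

theorem A_loop2_row_length (g : List (List Int)) (k : Nat) (res : List (List Int)) (i : Nat) :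
    ((A_loop2 g k res).getD i []).length = ((res.getD i []).length) := by
  induction k generalizing i with
  | zero => rfl
  | succ k ih =>
    rw [A_loop2_succ]
    simp only [pv_getD_set, List.length_set]
    split_ifs with h1 h2
    · obtain ⟨rfl, -⟩ := h1; simpa [List.getD_eq_getElem?_getD] using ih i
    · obtain ⟨rfl, -⟩ := h1; simpa [List.getD_eq_getElem?_getD] using ih i
    · simpa [List.getD_eq_getElem?_getD] using ih i

-- pointwise value of the grid after A's first loop
theorem A_loop1_get (g : List (List Int)) (k : Nat) (res : List (List Int))
    (hlen : res.length = g.length) (hg : g ≠ [])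
    (hk : k ≤ (g.headD []).length)
    (hr0 : (res.getD 0 []).length = (g.headD []).length)
    (hr1 : (res.getD (g.length - 1) []).length = (g.headD []).length)
    (i j : Nat) :
    ((A_loop1 g k res).getD i []).getD j 0 =
      if (i = 0 ∨ i = g.length - 1) ∧ j < k then (g.getD i []).getD j 0
      else (res.getD i []).getD j 0 := by
  induction k generalizing i j with
  | zero => simp [A_loop1]
  | succ k ih =>
    have hpos : 0 < g.length := List.length_pos_iff.mpr hg
    have hk' : k ≤ (g.headD []).length := Nat.le_of_succ_le hk
    have hRlen : (A_loop1 g k res).length = g.length := (A_loop1_length g k res).trans hlen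
    have hR0 : ((A_loop1 g k res).getD 0 []).length = (g.headD []).length :=
      (A_loop1_row_length g k res 0).trans hr0
    have hR1 : ((A_loop1 g k res).getD (g.length - 1) []).length = (g.headD []).length :=
      (A_loop1_row_length g k res (g.length - 1)).trans hr1
    rw [A_loop1_succ]
    simp only [pv_getD_set, List.length_set]
    split_ifs <;>
      (try simp only [pv_getD_set, List.length_set, hR0, hR1, ih hk', true_or, or_true,
        true_and, and_true]) <;>
      (try split_ifs) <;>
      (try simp only [pv_getD_set, List.length_set, hR0, hR1, ih hk', true_or, or_true,
        true_and, and_true]) <;>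
      (try split_ifs) <;>
        first
          | rfl
          | omega
          | (exfalso; omega)
          | (congr 1 <;> first | rfl | omega | (congr 1 <;> first | rfl | omega))

-- pointwise value of the grid after A's second loop
theorem A_loop2_get (g : List (List Int)) (k : Nat) (res : List (List Int))
    (hlen : res.length = g.length)
    (hk : k ≤ g.length)
    (hrow : ∀ i, i < g.length → (res.getD i []).length = (g.headD []).length)
    (hw : 0 < (g.headD []).length)
    (i j : Nat) :
    ((A_loop2 g k res).getD i []).getD j 0 =
      if i < k ∧ (j = 0 ∨ j = (g.headD []).length - 1) then (g.getD i []).getD j 0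
      else ((res.getD i []).getD j 0) := by
  induction k generalizing i j with
  | zero => simp [A_loop2]
  | succ k ih =>
    have hk' : k ≤ g.length := Nat.le_of_succ_le hk
    have hRlen : (A_loop2 g k res).length = g.length := (A_loop2_length g k res).trans hlen
    have hRk : ((A_loop2 g k res).getD k []).length = (g.headD []).length :=
      (A_loop2_row_length g k res k).trans (hrow k (by omega))
    rw [A_loop2_succ]
    split_ifs <;>
      (try simp only [pv_getD_set, List.length_set, hRk, hRlen, ih hk', true_or, or_true,
        true_and, and_true]) <;>
      (try split_ifs) <;>
      (try simp only [pv_getD_set, List.length_set, hRk, hRlen, ih hk', true_or, or_true,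
        true_and, and_true]) <;>
      (try split_ifs) <;>
        first
          | rfl
          | omega
          | (exfalso; omega)
          | (congr 1 <;> first | rfl | omega | (congr 1 <;> first | rfl | omega))

-- outer_ring, off the trivial branch, is loop2 after loop1 on the zero grid
theorem outer_ring_eq_loops (g : List (List Int)) (hg : ¬ (g = [] ∨ g.headD [] = [])) :
    outer_ring g = A_loop2 g g.length
      (A_loop1 g (g.headD []).length
        ((List.range g.length).map (fun _ => List.replicate (g.headD []).length (0 : Int)))) := by
  rw [outer_ring, if_neg hg]; rfl

theorem res0_getD (g : List (List Int)) (i : Nat) (hi : i < g.length) :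
    ((List.range g.length).map (fun _ => List.replicate (g.headD []).length (0 : Int))).getD i []
      = List.replicate (g.headD []).length (0 : Int) := by
  simp [List.getD_eq_getElem?_getD, hi]

-- full pointwise description of A's result
theorem outer_ring_get (g : List (List Int)) (hg : ¬ (g = [] ∨ g.headD [] = []))
    (i j : Nat) (hi : i < g.length) (hj : j < (g.headD []).length) :
    ((outer_ring g).getD i []).getD j 0 =
      if j = 0 ∨ j = (g.headD []).length - 1 ∨ i = 0 ∨ i = g.length - 1
      then (g.getD i []).getD j 0 else 0 := by
  obtain ⟨hg1, hg2⟩ := not_or.mp hg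
  have hpos : 0 < g.length := List.length_pos_iff.mpr hg1
  have hw : 0 < (g.headD []).length := List.length_pos_iff.mpr hg2
  rw [outer_ring_eq_loops g hg]
  rw [A_loop2_get g g.length _ ?hlen le_rfl ?hrow hw i j]
  case hlen => rw [A_loop1_length]; simp
  case hrow => intro t ht; rw [A_loop1_row_length, res0_getD g t ht]; simp
  rw [A_loop1_get g _ _ ?h1 hg1 le_rfl ?h2 ?h3 i j]
  case h1 => simp
  case h2 => rw [res0_getD g 0 hpos]; simp
  case h3 => rw [res0_getD g (g.length - 1) (by omega)]; simp
  rw [res0_getD g i hi]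
  simp only [List.getD_eq_getElem?_getD, List.getElem?_replicate]
  split_ifs <;> first | rfl | omega | (exfalso; omega) | simp

-- helpers describing B's result
theorem alt_nonbase (g : List (List Int)) (hg : ¬ (g = [] ∨ g.headD [] = [])) :
    outer_ring_alt g = g.zipIdx.map (fun p =>
      if p.2 = 0 ∨ p.2 = g.length - 1 then p.1.take (g.headD []).length
      else if (g.headD []).length = 1 then [p.1.getD 0 0]
      else p.1.getD 0 0 :: (List.replicate ((g.headD []).length - 2) (0 : Int) ++
        [p.1.getD ((g.headD []).length - 1) 0])) := by
  rw [outer_ring_alt, if_neg hg]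

theorem alt_length (g : List (List Int)) (hg : ¬ (g = [] ∨ g.headD [] = [])) :
    (outer_ring_alt g).length = g.length := by
  rw [alt_nonbase g hg]; simp

theorem alt_row (g : List (List Int)) (hg : ¬ (g = [] ∨ g.headD [] = []))
    (i : Nat) (hi : i < g.length) :
    (outer_ring_alt g).getD i [] =
      (if i = 0 ∨ i = g.length - 1 then (g.getD i []).take (g.headD []).length
       else if (g.headD []).length = 1 then [(g.getD i []).getD 0 0]
       else (g.getD i []).getD 0 0 :: (List.replicate ((g.headD []).length - 2) (0 : Int) ++
         [(g.getD i []).getD ((g.headD []).length - 1) 0])) := by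
  rw [alt_nonbase g hg]
  simp [List.getD_eq_getElem?_getD, List.getElem?_zipIdx, hi]

theorem pre_row (g : List (List Int)) (hPre : Pre_outer_ring g) (i : Nat) (hi : i < g.length) :
    (g.headD []).length ≤ (g.getD i []).length := by
  rw [List.getD_eq_getElem _ _ hi]
  exact hPre _ (List.getElem_mem hi)

theorem alt_row_length (g : List (List Int)) (hg : ¬ (g = [] ∨ g.headD [] = []))
    (hPre : Pre_outer_ring g) (i : Nat) (hi : i < g.length) :
    ((outer_ring_alt g).getD i []).length = (g.headD []).length := by
  have hp := pre_row g hPre i hi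
  have hw : 0 < (g.headD []).length := List.length_pos_iff.mpr (not_or.mp hg).2
  rw [alt_row g hg i hi]
  split_ifs with h1 h2
  · simp only [List.length_take]; omega
  · simp only [List.length_cons, List.length_nil]; omega
  · simp only [List.length_cons, List.length_append, List.length_replicate,
      List.length_nil]
    omega

theorem alt_get (g : List (List Int)) (hg : ¬ (g = [] ∨ g.headD [] = []))
    (hPre : Pre_outer_ring g) (i j : Nat) (hi : i < g.length) (hj : j < (g.headD []).length) :
    ((outer_ring_alt g).getD i []).getD j 0 =
      if j = 0 ∨ j = (g.headD []).length - 1 ∨ i = 0 ∨ i = g.length - 1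
      then (g.getD i []).getD j 0 else 0 := by
  have hp := pre_row g hPre i hi
  rw [alt_row g hg i hi]
  by_cases hb : i = 0 ∨ i = g.length - 1
  · rw [if_pos hb, if_pos (by tauto)]
    rw [List.getD_eq_getElem?_getD, List.getElem?_take_of_lt hj]
    exact List.getD_eq_getElem?_getD.symm
  · rw [if_neg hb]
    by_cases h2 : (g.headD []).length = 1
    · rw [if_pos h2]
      have hj0 : j = 0 := by omega
      subst hj0
      rw [if_pos (by tauto), List.getD_cons_zero]
    · rw [if_neg h2]
      by_cases hj0 : j = 0
      · subst hj0
        rw [if_pos (by tauto), List.getD_cons_zero]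
      · obtain ⟨m, rfl⟩ : ∃ m, j = m + 1 := ⟨j - 1, by omega⟩
        rw [List.getD_cons_succ]
        by_cases hjw : m + 1 = (g.headD []).length - 1
        · rw [if_pos (by tauto)]
          rw [List.getD_append_right _ _ _ _ (by simp only [List.length_replicate]; omega)]
          simp only [List.length_replicate]
          have hm : m - ((g.headD []).length - 2) = 0 := by omega
          rw [hm, List.getD_cons_zero]
          congr 1
          omega
        · rw [if_neg (by tauto)]
          rw [List.getD_append _ _ _ _ (by simp only [List.length_replicate]; omega)]
          exact List.getD_replicate 0 (by omega)

theorem outer_ring_length (g : List (List Int)) (hg : ¬ (g = [] ∨ g.headD [] = [])) :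
    (outer_ring g).length = g.length := by
  rw [outer_ring_eq_loops g hg, A_loop2_length, A_loop1_length]; simp

theorem outer_ring_row_length (g : List (List Int)) (hg : ¬ (g = [] ∨ g.headD [] = []))
    (i : Nat) (hi : i < g.length) :
    ((outer_ring g).getD i []).length = (g.headD []).length := by
  rw [outer_ring_eq_loops g hg, A_loop2_row_length, A_loop1_row_length, res0_getD g i hi]
  simp

-- ===== VERDICT (by name: the statement is the Claim_ definition above) =====
theorem outer_ring_spec : Claim_equal_outer_ring := by
  intro g _ hPre
  show outer_ring g = outer_ring_alt g
  by_cases hg : g = [] ∨ g.headD [] = []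
  · rw [outer_ring, if_pos hg, outer_ring_alt, if_pos hg]
  · refine List.ext_getElem ?_ ?_
    · rw [outer_ring_length g hg, alt_length g hg]
    · intro i hi1 hi2
      have hi : i < g.length := by rwa [outer_ring_length g hg] at hi1
      rw [← List.getD_eq_getElem _ [] hi1, ← List.getD_eq_getElem _ [] hi2]
      refine List.ext_getElem ?_ ?_
      · rw [outer_ring_row_length g hg i hi, alt_row_length g hg hPre i hi]
      · intro j hj1 hj2
        have hj : j < (g.headD []).length := by
          rwa [outer_ring_row_length g hg i hi] at hj1
        rw [← List.getD_eq_getElem _ 0 hj1, ← List.getD_eq_getElem _ 0 hj2]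
        rw [outer_ring_get g hg i j hi hj, alt_get g hg hPre i j hi hj]
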